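-- pv_equiv track=rewrite | github.com/amunozUOW/QVAF | analysis_agent.py | count_by_correctness_pattern
-- ===== SOURCE A (Python) =====
-- def count_by_correctness_pattern(results):
--     """Count questions by AI correctness pattern"""
--     patterns = {
--         'correct_both': 0,      # AI correct without and with RAG
--         'correct_rag_only': 0,  # AI correct only with RAG
--         'correct_baseline_only': 0,  # AI correct only without RAG
--         'incorrect_both': 0     # AI incorrect in both conditions
--     }
--
--     for r in results:
--         without = r.get('correct_without_rag', False)
--         with_rag = r.get('correct_with_rag', False)
--
--         if without and with_rag:
--             patterns['correct_both'] += 1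
--         elif with_rag and not without:
--             patterns['correct_rag_only'] += 1
--         elif without and not with_rag:
--             patterns['correct_baseline_only'] += 1
--         else:
--             patterns['incorrect_both'] += 1
--
--     return patterns
-- ===== SOURCE B (Python) =====
-- def count_by_correctness_pattern(results):
--     """Count questions by AI correctness pattern via inclusion-exclusion over
--     three aggregate counts instead of bucketing each record."""
--     flags = [(bool(r.get('correct_without_rag', False)),
--               bool(r.get('correct_with_rag', False))) for r in results]
--     n = len(flags)
--     without = sum(1 for w, _ in flags if w)
--     with_rag = sum(1 for _, g in flags if g)
--     both = sum(1 for w, g in flags if w and g)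
--     return {
--         'correct_both': both,
--         'correct_rag_only': with_rag - both,
--         'correct_baseline_only': without - both,
--         'incorrect_both': n - without - with_rag + both,
--     }
-- ===== Notes on version B (the rewrite author's own statement) =====
-- stated objective: alternative
-- what changed: Replaces the four-way if/elif bucketing of each record with inclusion-exclusion: three aggregate counts (without, with_rag, both) plus the length determine all four buckets arithmetically.
import Mathlib
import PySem

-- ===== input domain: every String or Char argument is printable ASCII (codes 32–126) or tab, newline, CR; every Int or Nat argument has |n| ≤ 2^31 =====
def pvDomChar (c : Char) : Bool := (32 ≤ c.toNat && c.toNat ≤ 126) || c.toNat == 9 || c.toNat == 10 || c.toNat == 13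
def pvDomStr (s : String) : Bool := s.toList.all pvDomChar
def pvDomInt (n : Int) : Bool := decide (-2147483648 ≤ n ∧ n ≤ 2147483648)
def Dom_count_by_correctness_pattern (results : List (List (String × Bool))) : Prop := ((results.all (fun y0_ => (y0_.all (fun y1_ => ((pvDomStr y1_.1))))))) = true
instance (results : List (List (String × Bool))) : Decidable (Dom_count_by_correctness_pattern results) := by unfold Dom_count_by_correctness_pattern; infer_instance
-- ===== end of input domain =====

-- B derives the four buckets by inclusion-exclusion from three aggregate counts and the length, instead of bucketing each record through an if/elif chain (alternative; same cost).
-- ===== PORT A =====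
def pvStepA (d : PySem.Dict String Int) (r : List (String × Bool)) : PySem.Dict String Int :=
  let without := (PySem.Dict.mk r).getD "correct_without_rag" false
  let with_rag := (PySem.Dict.mk r).getD "correct_with_rag" false
  if without && with_rag then d.modify "correct_both" 0 (· + 1)
  else if with_rag && !without then d.modify "correct_rag_only" 0 (· + 1)
  else if without && !with_rag then d.modify "correct_baseline_only" 0 (· + 1)
  else d.modify "incorrect_both" 0 (· + 1)

def count_by_correctness_pattern (results : List (List (String × Bool))) : List (String × Int) :=
  (results.foldl pvStepA
    (PySem.Dict.mk [("correct_both", (0 : Int)), ("correct_rag_only", 0),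
                    ("correct_baseline_only", 0), ("incorrect_both", 0)])).items

-- ===== PORT B =====
def pvKeyB (r : List (String × Bool)) : Bool × Bool :=
  ((PySem.Dict.mk r).getD "correct_without_rag" false,
   (PySem.Dict.mk r).getD "correct_with_rag" false)

def count_by_correctness_pattern_alt (results : List (List (String × Bool))) : List (String × Int) :=
  let flags := results.map pvKeyB
  let n : Int := flags.length
  let without : Int := flags.countP (fun p => p.1)
  let with_rag : Int := flags.countP (fun p => p.2)
  let both : Int := flags.countP (fun p => p.1 && p.2)
  [("correct_both", both),
   ("correct_rag_only", with_rag - both),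
   ("correct_baseline_only", without - both),
   ("incorrect_both", n - without - with_rag + both)]

-- ===== PRECONDITION & SPEC =====
def Spec_count_by_correctness_pattern (results : List (List (String × Bool))) (out : List (String × Int)) : Prop := out = count_by_correctness_pattern_alt results
instance (results : List (List (String × Bool))) (out : List (String × Int)) : Decidable (Spec_count_by_correctness_pattern results out) := by unfold Spec_count_by_correctness_pattern; infer_instance

-- ===== CLAIM (what is proved, stated in full; the proofs are below) =====
def Claim_equal_count_by_correctness_pattern : Prop := ∀ (results : List (List (String × Bool))), Dom_count_by_correctness_pattern results → Spec_count_by_correctness_pattern results (count_by_correctness_pattern results)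

-- ===== LEMMAS AND PROOFS =====
lemma pvFoldA_eq (results : List (List (String × Bool))) (a b c d : Int) :
    results.foldl pvStepA
      (PySem.Dict.mk [("correct_both", a), ("correct_rag_only", b),
                      ("correct_baseline_only", c), ("incorrect_both", d)])
    = PySem.Dict.mk [("correct_both", a + (results.map pvKeyB).count (true, true)),
                     ("correct_rag_only", b + (results.map pvKeyB).count (false, true)),
                     ("correct_baseline_only", c + (results.map pvKeyB).count (true, false)),
                     ("incorrect_both", d + (results.map pvKeyB).count (false, false))] := by
  induction results generalizing a b c d with
  | nil => simp
  | cons r l ih =>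
    have hkey : pvKeyB r = ((PySem.Dict.mk r).getD "correct_without_rag" false,
                            (PySem.Dict.mk r).getD "correct_with_rag" false) := rfl
    rw [List.foldl_cons]
    cases hw : (PySem.Dict.mk r).getD "correct_without_rag" false <;>
    cases hr : (PySem.Dict.mk r).getD "correct_with_rag" false
    · rw [show pvStepA (PySem.Dict.mk [("correct_both", a), ("correct_rag_only", b),
            ("correct_baseline_only", c), ("incorrect_both", d)]) r
          = PySem.Dict.mk [("correct_both", a), ("correct_rag_only", b),
            ("correct_baseline_only", c), ("incorrect_both", d + 1)] from by
            simp only [pvStepA, hw, hr]; rfl, ih]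
      simp [hkey, hw, hr]; ring
    · rw [show pvStepA (PySem.Dict.mk [("correct_both", a), ("correct_rag_only", b),
            ("correct_baseline_only", c), ("incorrect_both", d)]) r
          = PySem.Dict.mk [("correct_both", a), ("correct_rag_only", b + 1),
            ("correct_baseline_only", c), ("incorrect_both", d)] from by
            simp only [pvStepA, hw, hr]; rfl, ih]
      simp [hkey, hw, hr]; ring
    · rw [show pvStepA (PySem.Dict.mk [("correct_both", a), ("correct_rag_only", b),
            ("correct_baseline_only", c), ("incorrect_both", d)]) r
          = PySem.Dict.mk [("correct_both", a), ("correct_rag_only", b),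
            ("correct_baseline_only", c + 1), ("incorrect_both", d)] from by
            simp only [pvStepA, hw, hr]; rfl, ih]
      simp [hkey, hw, hr]; ring
    · rw [show pvStepA (PySem.Dict.mk [("correct_both", a), ("correct_rag_only", b),
            ("correct_baseline_only", c), ("incorrect_both", d)]) r
          = PySem.Dict.mk [("correct_both", a + 1), ("correct_rag_only", b),
            ("correct_baseline_only", c), ("incorrect_both", d)] from by
            simp only [pvStepA, hw, hr]; rfl, ih]
      simp [hkey, hw, hr]; ring

-- inclusion-exclusion: each of A's four pattern counts is a linear combination of B's three aggregate counts and the length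
lemma pvAltCounts (l : List (Bool × Bool)) :
    ((l.count (true, true) : Int) = l.countP (fun p => p.1 && p.2))
  ∧ ((l.count (false, true) : Int) = (l.countP (fun p => p.2) : Int) - l.countP (fun p => p.1 && p.2))
  ∧ ((l.count (true, false) : Int) = (l.countP (fun p => p.1) : Int) - l.countP (fun p => p.1 && p.2))
  ∧ ((l.count (false, false) : Int) = (l.length : Int) - l.countP (fun p => p.1)
      - l.countP (fun p => p.2) + l.countP (fun p => p.1 && p.2)) := by
  induction l with
  | nil => simp
  | cons p t ih =>
    obtain ⟨h1, h2, h3, h4⟩ := ih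
    obtain ⟨x, y⟩ := p
    cases x <;> cases y <;>
      simp [List.count_cons, List.countP_cons, h1, h2, h3, h4] <;> push_cast <;> omega

-- ===== VERDICT (by name: the statement is the Claim_ definition above) =====
theorem count_by_correctness_pattern_spec : Claim_equal_count_by_correctness_pattern := by
  intro results _
  unfold Spec_count_by_correctness_pattern count_by_correctness_pattern count_by_correctness_pattern_alt
  obtain ⟨e1, e2, e3, e4⟩ := pvAltCounts (results.map pvKeyB)
  simp only [pvFoldA_eq, zero_add]
  refine congrArg₂ _ ?_ (congrArg₂ _ ?_ (congrArg₂ _ ?_ (congrArg₂ _ ?_ rfl))) <;>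
    simp only [Prod.mk.injEq, true_and] <;>
    first | exact e1 | exact e2 | exact e3 | exact e4
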